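-- pv_equiv track=rewrite | github.com/jonDomino/nba_scanner | core/reusable_functions.py | derive_implied_no_asks
-- ===== SOURCE A (Python) =====
-- from typing import Optional, Dict, Any, Tuple, List
--
-- def derive_implied_no_asks(yes_bids: List[List[int]]) -> List[Tuple[int, int]]:
--     """
--     Derive implied NO asks from YES bids.
--     Returns list of (price_cents, qty) sorted by price ascending.
--     """
--     if not yes_bids:
--         return []
--
--     # Best bid is last element
--     implied_asks = []
--     for yes_price, yes_qty in yes_bids:
--         no_ask = 100 - yes_price
--         implied_asks.append((no_ask, yes_qty))
--
--     # Sort by price ascending (lowest first)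
--     implied_asks.sort(key=lambda x: x[0])
--     return implied_asks
-- ===== SOURCE B (Python) =====
-- def derive_implied_no_asks(yes_bids):
--     """
--     Derive implied NO asks from YES bids.
--     Returns list of (price_cents, qty) sorted by price ascending.
--     """
--     if not yes_bids:
--         return []
--     # Group quantities by implied NO price; a stable sort keeps equal-key
--     # groups in input order, so sorting only the distinct prices and
--     # flattening the buckets reproduces A's result exactly.
--     buckets = {}
--     for yes_price, yes_qty in yes_bids:
--         no_ask = 100 - yes_price
--         buckets[no_ask] = buckets.get(no_ask, []) + [yes_qty]
--     out = []
--     for price in sorted(buckets):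
--         for qty in buckets[price]:
--             out.append((price, qty))
--     return out
-- ===== Notes on version B (the rewrite author's own statement) =====
-- stated objective: alternative
-- what changed: B groups quantities into a dict keyed by implied NO price and then sorts only the distinct prices and flattens the buckets, instead of A's map-every-row-then-stable-sort-all; it is correct because a stable sort keeps equal-price rows in input order, exactly the bucket order.
import Mathlib
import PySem

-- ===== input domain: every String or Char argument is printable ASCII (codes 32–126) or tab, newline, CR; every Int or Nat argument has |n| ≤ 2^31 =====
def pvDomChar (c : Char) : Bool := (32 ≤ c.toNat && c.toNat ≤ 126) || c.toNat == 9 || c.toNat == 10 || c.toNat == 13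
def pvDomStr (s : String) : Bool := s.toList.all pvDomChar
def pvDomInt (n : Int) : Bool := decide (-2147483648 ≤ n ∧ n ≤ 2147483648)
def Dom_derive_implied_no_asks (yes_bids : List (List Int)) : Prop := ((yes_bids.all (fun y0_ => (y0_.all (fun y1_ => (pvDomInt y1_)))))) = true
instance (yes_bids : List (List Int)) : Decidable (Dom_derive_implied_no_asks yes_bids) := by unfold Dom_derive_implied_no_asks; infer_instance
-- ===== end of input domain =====

-- B groups quantities into a dict keyed by implied NO price, sorts only the distinct prices and flattens the buckets, instead of A's map-then-stable-sort-all (alternative decomposition, same result by stability).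


-- ===== PORT A =====
-- A: early return on empty, map each [price, qty] to (100 - price, qty) in input
-- order, then stable-sort ascending by the first component.
def derive_implied_no_asks (yes_bids : List (List Int)) : List (Int × Int) :=
  if yes_bids = [] then []
  else
    let implied_asks := yes_bids.foldl
      (fun acc b => acc ++ [(100 - PySem.List.pyGetD b 0 0, PySem.List.pyGetD b 1 0)]) []
    PySem.List.sorted implied_asks (fun x => x.1)

-- ===== PORT B =====
-- B: early return on empty, group quantities into a dict keyed by implied NO
-- price, then sort the distinct prices and flatten the buckets in key order.
def derive_implied_no_asks_alt (yes_bids : List (List Int)) : List (Int × Int) :=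
  if yes_bids = [] then []
  else
    let buckets := yes_bids.foldl
      (fun d b => d.modify (100 - PySem.List.pyGetD b 0 0) [] (· ++ [PySem.List.pyGetD b 1 0]))
      PySem.Dict.empty
    (PySem.List.sorted buckets.keys (fun k => k)).foldl
      (fun acc price => (buckets.getD price []).foldl (fun acc2 qty => acc2 ++ [(price, qty)]) acc) []

-- ===== PRECONDITION & SPEC =====
-- Pre_ excludes rows whose length is not 2: Python's tuple unpacking raises ValueError there (in both A and B).
def Pre_derive_implied_no_asks (yes_bids : List (List Int)) : Prop :=
  ∀ b ∈ yes_bids, b.length = 2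
instance (yes_bids : List (List Int)) : Decidable (Pre_derive_implied_no_asks yes_bids) := by
  unfold Pre_derive_implied_no_asks; infer_instance
def pvWitness_derive_implied_no_asks : List (List Int) := [[30, 5], [70, 2], [30, 1]]

def Spec_derive_implied_no_asks (yes_bids : List (List Int)) (out : List (Int × Int)) : Prop := out = derive_implied_no_asks_alt yes_bids
instance (yes_bids : List (List Int)) (out : List (Int × Int)) : Decidable (Spec_derive_implied_no_asks yes_bids out) := by unfold Spec_derive_implied_no_asks; infer_instance

-- ===== CLAIM (what is proved, stated in full; the proofs are below) =====
def Claim_equal_derive_implied_no_asks : Prop := ∀ (yes_bids : List (List Int)), Dom_derive_implied_no_asks yes_bids → Pre_derive_implied_no_asks yes_bids → Spec_derive_implied_no_asks yes_bids (derive_implied_no_asks yes_bids)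

-- ===== LEMMAS AND PROOFS =====

-- stable insertion preserves sortedness by the first component
theorem pairwise_insertBy_fst (x : Int × Int) (acc : List (Int × Int))
    (h : acc.Pairwise (fun a b => a.1 ≤ b.1)) :
    (PySem.List.insertBy (fun a b => decide (a.1 < b.1)) x acc).Pairwise (fun a b => a.1 ≤ b.1) := by
  induction acc with
  | nil => simp [PySem.List.insertBy]
  | cons y ys ih =>
    rcases List.pairwise_cons.mp h with ⟨hy, hys⟩
    simp only [PySem.List.insertBy]
    by_cases hlt : x.1 < y.1
    · rw [if_pos (by simpa using hlt)]
      refine List.pairwise_cons.mpr ⟨?_, h⟩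
      intro z hz
      rcases List.mem_cons.mp hz with hz | hz
      · subst hz; omega
      · have := hy z hz; omega
    · rw [if_neg (by simpa using hlt)]
      refine List.pairwise_cons.mpr ⟨?_, ih hys⟩
      intro z hz
      rcases (PySem.List.mem_insertBy _ _ _ _).mp hz with hz | hz
      · subst hz; omega
      · exact hy z hz

-- a stable insertion into a sorted list puts x after all equal-key elements
theorem filter_insertBy_fst (x : Int × Int) (k : Int) (acc : List (Int × Int))
    (h : acc.Pairwise (fun a b => a.1 ≤ b.1)) :
    (PySem.List.insertBy (fun a b => decide (a.1 < b.1)) x acc).filter (fun y => y.1 == k)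
      = if x.1 == k then acc.filter (fun y => y.1 == k) ++ [x]
        else acc.filter (fun y => y.1 == k) := by
  induction acc with
  | nil =>
    simp only [PySem.List.insertBy, List.filter_cons, List.filter_nil]
    by_cases hxk : x.1 = k <;> simp [hxk]
  | cons y ys ih =>
    rcases List.pairwise_cons.mp h with ⟨hy, hys⟩
    simp only [PySem.List.insertBy]
    by_cases hlt : x.1 < y.1
    · rw [if_pos (by simpa using hlt)]
      by_cases hxk : x.1 = k
      · have hnil : List.filter (fun y => y.1 == k) (y :: ys) = [] := by
          apply List.filter_eq_nil_iff.mpr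
          intro z hz
          have hz1 : y.1 ≤ z.1 := by
            rcases List.mem_cons.mp hz with hz | hz
            · subst hz; omega
            · exact hy z hz
          simp; omega
        rw [List.filter_cons_of_pos (by simpa using hxk), hnil, if_pos (by simpa using hxk)]
        simp
      · rw [List.filter_cons_of_neg (by simpa using hxk), if_neg (by simpa using hxk)]
    · rw [if_neg (by simpa using hlt)]
      simp only [List.filter_cons, ih hys]
      by_cases hyk : y.1 = k <;> by_cases hxk : x.1 = k <;> simp [hyk, hxk]

-- folding stable insertions: sortedness and per-key filters of the accumulator
theorem foldl_insertBy_fst (L : List (Int × Int)) :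
    ∀ (acc : List (Int × Int)), acc.Pairwise (fun a b => a.1 ≤ b.1) →
    (L.foldl (fun acc x => PySem.List.insertBy (fun a b => decide (a.1 < b.1)) x acc) acc).Pairwise (fun a b => a.1 ≤ b.1)
    ∧ ∀ k, (L.foldl (fun acc x => PySem.List.insertBy (fun a b => decide (a.1 < b.1)) x acc) acc).filter (fun y => y.1 == k)
        = acc.filter (fun y => y.1 == k) ++ L.filter (fun y => y.1 == k) := by
  induction L with
  | nil => intro acc h; exact ⟨h, by simp⟩
  | cons x xs ih =>
    intro acc h
    have hins := pairwise_insertBy_fst x acc h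
    rcases ih _ hins with ⟨hp, hf⟩
    refine ⟨hp, fun k => ?_⟩
    rw [List.foldl_cons] at *
    rw [hf k, filter_insertBy_fst x k acc h, List.filter_cons]
    by_cases hxk : x.1 = k <;> simp [hxk]

-- stability of PySem's sort: per-key filters are unchanged
theorem filter_sorted_fst (L : List (Int × Int)) (k : Int) :
    (PySem.List.sorted L (fun x => x.1)).filter (fun y => y.1 == k)
      = L.filter (fun y => y.1 == k) := by
  rw [PySem.List.sorted_eq_foldl_insertBy]
  have := (foldl_insertBy_fst L [] (by simp)).2 k
  simpa using this

-- two key-sorted lists with identical per-key filters are equal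
theorem eq_of_pairwise_of_filter_eq :
    ∀ (M N : List (Int × Int)), M.Pairwise (fun a b => a.1 ≤ b.1) → N.Pairwise (fun a b => a.1 ≤ b.1) →
    (∀ k, M.filter (fun y => y.1 == k) = N.filter (fun y => y.1 == k)) → M = N := by
  intro M
  induction M with
  | nil =>
    intro N _ _ hf
    cases N with
    | nil => rfl
    | cons n N' =>
      have := hf n.1
      simp at this
  | cons m M' ih =>
    intro N hM hN hf
    cases N with
    | nil =>
      have := hf m.1
      simp at this
    | cons n N' =>
      rcases List.pairwise_cons.mp hM with ⟨hm, hM'⟩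
      rcases List.pairwise_cons.mp hN with ⟨hn, hN'⟩
      have hkeys : m.1 = n.1 := by
        by_contra hne
        rcases lt_or_gt_of_ne hne with hlt | hgt
        · -- all of N has key ≥ n.1 > m.1, so N.filter at m.1 is empty, yet contains m
          have h1 := hf m.1
          have h2 : (List.filter (fun y => y.1 == m.1) (n :: N')) = [] := by
            apply List.filter_eq_nil_iff.mpr
            intro z hz
            have : n.1 ≤ z.1 := by
              rcases List.mem_cons.mp hz with hz | hz
              · simp [hz]
              · exact hn z hz
            simp; omega
          rw [h2] at h1
          simp at h1
        · have h1 := hf n.1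
          have h2 : (List.filter (fun y => y.1 == n.1) (m :: M')) = [] := by
            apply List.filter_eq_nil_iff.mpr
            intro z hz
            have : m.1 ≤ z.1 := by
              rcases List.mem_cons.mp hz with hz | hz
              · simp [hz]
              · exact hm z hz
            simp; omega
          rw [h2] at h1
          simp at h1
      have hmn : m = n := by
        have h1 := hf m.1
        simp [hkeys] at h1
        exact h1.1
      subst hmn
      have htails : ∀ k, M'.filter (fun y => y.1 == k) = N'.filter (fun y => y.1 == k) := by
        intro k
        have h1 := hf k
        by_cases hk : m.1 = k
        · simp [hk] at h1; exact h1
        · simpa [List.filter_cons, hk] using h1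
      rw [ih N' hM' hN' htails]

-- re-attaching the common key to a bucket of quantities gives back the filtered rows
theorem map_snd_filter_fst (k : Int) (l : List (Int × Int)) :
    ((l.filter (fun p => p.1 == k)).map (·.2)).map (Prod.mk k)
      = l.filter (fun p => p.1 == k) := by
  induction l with
  | nil => rfl
  | cons p l ih =>
    rw [List.filter_cons]
    by_cases hk : p.1 = k
    · simp only [hk, beq_self_eq_true, if_pos]
      simp only [List.map_cons, ih]
      have : p = (k, p.2) := by cases p; simp_all
      rw [← this]
    · simp [hk, ih]

-- flattening filters over a strictly increasing key list is sorted by the first component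
theorem pairwise_flatMap_filter (ps : List (Int × Int)) :
    ∀ (K : List Int), K.Pairwise (· < ·) →
    (K.flatMap (fun k => ps.filter (fun p => p.1 == k))).Pairwise (fun a b => a.1 ≤ b.1) := by
  intro K
  induction K with
  | nil => intro _; simp
  | cons k K' ih =>
    intro h
    rcases List.pairwise_cons.mp h with ⟨hk, hK'⟩
    rw [List.flatMap_cons]
    apply List.pairwise_append.mpr
    refine ⟨?_, ih hK', ?_⟩
    · refine List.pairwise_iff_forall_sublist.mpr ?_
      intro a b hsub
      have ha : a ∈ ps.filter (fun p => p.1 == k) := hsub.subset (by simp)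
      have hb : b ∈ ps.filter (fun p => p.1 == k) := hsub.subset (by simp)
      have h1 := List.of_mem_filter ha
      have h2 := List.of_mem_filter hb
      simp at h1 h2; omega
    · intro a ha b hb
      have hak : a.1 = k := by
        have := List.of_mem_filter ha; simpa using this
      rcases List.mem_flatMap.mp hb with ⟨k', hk', hb'⟩
      have hbk : b.1 = k' := by
        have := List.of_mem_filter hb'; simpa using this
      have := hk k' hk'
      omega

-- the per-key filter of the flattened buckets
theorem filter_flatMap_filter (ps : List (Int × Int)) (k0 : Int) :
    ∀ (K : List Int), K.Nodup →
    (K.flatMap (fun k => ps.filter (fun p => p.1 == k))).filter (fun p => p.1 == k0)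
      = if k0 ∈ K then ps.filter (fun p => p.1 == k0) else [] := by
  intro K
  induction K with
  | nil => intro _; simp
  | cons k K' ih =>
    intro hnd
    rcases List.nodup_cons.mp hnd with ⟨hk, hnd'⟩
    rw [List.flatMap_cons, List.filter_append, ih hnd']
    by_cases hkk : k = k0
    · subst hkk
      have h1 : (ps.filter (fun p => p.1 == k)).filter (fun p => p.1 == k) = ps.filter (fun p => p.1 == k) := by
        rw [List.filter_filter]; apply List.filter_congr; intro x _; simp
      simp [h1, hk]
    · have h1 : (ps.filter (fun p => p.1 == k)).filter (fun p => p.1 == k0) = [] := by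
        apply List.filter_eq_nil_iff.mpr
        intro z hz
        have := List.of_mem_filter hz
        simp at this ⊢; omega
      rw [h1]
      by_cases hmem : k0 ∈ K' <;> simp [hmem, Ne.symm hkk]

-- ===== VERDICT (by name: the statement is the Claim_ definition above) =====
theorem derive_implied_no_asks_spec : Claim_equal_derive_implied_no_asks := by
  intro yes_bids _ _
  unfold Spec_derive_implied_no_asks derive_implied_no_asks derive_implied_no_asks_alt
  split_ifs with h
  · rfl
  · simp only [PySem.List.foldl_append_singleton_eq_map, List.nil_append]
    set F : List Int → Int × Int :=
      fun b => (100 - PySem.List.pyGetD b 0 0, PySem.List.pyGetD b 1 0) with hF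
    set ps : List (Int × Int) := yes_bids.map F with hps
    -- the grouping fold, rewritten as a fold over the mapped pairs
    have hfold : yes_bids.foldl
        (fun d b => d.modify (100 - PySem.List.pyGetD b 0 0) [] (· ++ [PySem.List.pyGetD b 1 0]))
        PySem.Dict.empty
      = ps.foldl (fun d p => d.modify p.1 [] (· ++ [p.2])) PySem.Dict.empty := by
      rw [hps, List.foldl_map]
    rw [hfold]
    set buckets := ps.foldl (fun d p => d.modify p.1 [] (· ++ [p.2])) PySem.Dict.empty with hb
    have hkeys : buckets.keys = PySem.Set.ofList (ps.map (·.1)) := by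
      rw [hb]
      have := PySem.Dict.keys_foldl_modify_key (l := ps) (key := (·.1)) (d0 := ([] : List Int))
        (f := fun _ p => (· ++ [p.2])) (d := PySem.Dict.empty)
      rw [this, PySem.Dict.keys_empty, PySem.Set.update_nil_left]
    have hgetD : ∀ c, buckets.getD c [] = (ps.filter (fun p => p.1 == c)).map (·.2) := by
      intro c
      rw [hb, PySem.Dict.getD_foldl_modify_append, PySem.Dict.getD_empty, List.nil_append]
    -- flatten B's two nested append loops into filters per sorted distinct key
    have hB : ∀ (Kl : List Int) (acc : List (Int × Int)),
        Kl.foldl (fun acc price => acc ++ (buckets.getD price []).map (Prod.mk price)) acc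
          = acc ++ Kl.flatMap (fun k => ps.filter (fun p => p.1 == k)) := by
      intro Kl
      induction Kl with
      | nil => intro acc; simp
      | cons k Kl ih =>
        intro acc
        rw [List.foldl_cons, ih, hgetD, map_snd_filter_fst k ps, List.flatMap_cons,
          List.append_assoc]
    rw [hkeys, hB, List.nil_append]
    set K := PySem.List.sorted (PySem.Set.ofList (ps.map (·.1))) (fun k => k) with hK
    -- K is strictly increasing, hence Nodup
    have hKlt : K.Pairwise (· < ·) := by
      rw [hK]; exact PySem.List.sorted_ofList_pairwise_lt (ps.map (·.1))
    have hKnd : K.Nodup := hKlt.imp (fun h => ne_of_lt h)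
    have hKmem : ∀ k, k ∈ K ↔ k ∈ ps.map (·.1) := by
      intro k
      rw [hK, PySem.List.mem_sorted, PySem.Set.mem_ofList]
    -- both sides are key-sorted with identical per-key filters
    apply eq_of_pairwise_of_filter_eq
    · exact PySem.List.sorted_pairwise ps (fun x => x.1)
    · exact pairwise_flatMap_filter ps K hKlt
    · intro k
      rw [filter_sorted_fst, filter_flatMap_filter ps k K hKnd]
      by_cases hmem : k ∈ K
      · simp [hmem]
      · have hnilf : ps.filter (fun p => p.1 == k) = [] := by
          apply List.filter_eq_nil_iff.mpr
          intro z hz hzk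
          apply hmem
          rw [hKmem]
          exact List.mem_map.mpr ⟨z, hz, by simpa using hzk⟩
        simp [hmem, hnilf]
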